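-- pv_equiv track=rewrite | github.com/leonjovanovic/docudialogue | graphs/graph_utils.py | _find_starter_node_in_group
-- ===== SOURCE A (Python) =====
-- def _find_starter_node_in_group(
--     group_node_ids: list[int], ordered_nodes: list[int]
-- ) -> int:
--     starter_node_id = None
--     for node_id in ordered_nodes:
--         if node_id in group_node_ids:
--             starter_node_id = node_id
--             break
--     return starter_node_id
-- ===== SOURCE B (Python) =====
-- def _find_starter_node_in_group(group_node_ids, ordered_nodes):
--     pos = {}
--     for i, n in enumerate(ordered_nodes):
--         if n not in pos:
--             pos[n] = i
--     best = None
--     best_i = None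
--     for g in group_node_ids:
--         if g in pos and (best_i is None or pos[g] < best_i):
--             best = g
--             best_i = pos[g]
--     return best
-- ===== Notes on version B (the rewrite author's own statement) =====
-- stated objective: alternative
-- what changed: Instead of scanning ordered_nodes with an inner membership test and early break, B builds a first-occurrence index map of ordered_nodes once and then iterates over the group, returning the group node with the smallest recorded index (None if none is present).
import Mathlib
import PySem

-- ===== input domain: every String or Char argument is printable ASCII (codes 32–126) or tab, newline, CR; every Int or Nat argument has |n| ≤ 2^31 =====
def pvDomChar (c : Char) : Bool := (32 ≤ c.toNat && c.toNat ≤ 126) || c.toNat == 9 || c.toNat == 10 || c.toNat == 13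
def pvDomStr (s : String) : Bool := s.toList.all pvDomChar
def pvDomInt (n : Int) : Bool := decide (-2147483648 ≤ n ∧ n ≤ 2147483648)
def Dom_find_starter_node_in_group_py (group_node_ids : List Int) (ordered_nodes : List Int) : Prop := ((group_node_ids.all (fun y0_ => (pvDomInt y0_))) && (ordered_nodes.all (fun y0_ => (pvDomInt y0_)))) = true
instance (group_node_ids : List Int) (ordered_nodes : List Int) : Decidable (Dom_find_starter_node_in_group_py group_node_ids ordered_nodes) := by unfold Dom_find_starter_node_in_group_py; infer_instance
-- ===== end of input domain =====

-- B replaces A's scan of ordered_nodes (inner membership test, early break) by a first-occurrence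
-- index map over ordered_nodes and an argmin loop over the group; objective: alternative algorithm.

-- ===== PORT A =====
-- A's loop: walk ordered_nodes, break at the first node contained in group_node_ids.
def pvA_loop (group_node_ids : List Int) : List Int → Option Int
  | [] => none
  | node_id :: rest =>
    if group_node_ids.contains node_id then some node_id else pvA_loop group_node_ids rest

def find_starter_node_in_group_py (group_node_ids : List Int) (ordered_nodes : List Int) : Option Int :=
  pvA_loop group_node_ids ordered_nodes

-- ===== PORT B =====
-- Source B's first loop: `for i, n in enumerate(ordered_nodes): if n not in pos: pos[n] = i`
def pvB_posAux (d : PySem.Dict Int Int) (i : Int) : List Int → PySem.Dict Int Int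
  | [] => d
  | n :: rest => pvB_posAux (if (d.get? n).isSome then d else d.insert n i) (i + 1) rest

-- Source B's second loop: `if g in pos and (best_i is None or pos[g] < best_i): best, best_i = g, pos[g]`
def pvB_pickAux (pos : PySem.Dict Int Int) (best best_i : Option Int) :
    List Int → Option Int × Option Int
  | [] => (best, best_i)
  | g :: rest =>
    match pos.get? g with
    | none => pvB_pickAux pos best best_i rest
    | some i =>
      match best_i with
      | none => pvB_pickAux pos (some g) (some i) rest
      | some bi =>
        if i < bi then pvB_pickAux pos (some g) (some i) rest
        else pvB_pickAux pos best best_i rest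

def find_starter_node_in_group_py_alt (group_node_ids : List Int) (ordered_nodes : List Int) : Option Int :=
  (pvB_pickAux (pvB_posAux PySem.Dict.empty 0 ordered_nodes) none none group_node_ids).1

-- ===== PRECONDITION & SPEC =====
def Spec_find_starter_node_in_group_py (group_node_ids : List Int) (ordered_nodes : List Int) (out : Option Int) : Prop := out = find_starter_node_in_group_py_alt group_node_ids ordered_nodes
instance (group_node_ids : List Int) (ordered_nodes : List Int) (out : Option Int) : Decidable (Spec_find_starter_node_in_group_py group_node_ids ordered_nodes out) := by unfold Spec_find_starter_node_in_group_py; infer_instance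

-- ===== CLAIM (what is proved, stated in full; the proofs are below) =====
def Claim_equal_find_starter_node_in_group_py : Prop := ∀ (group_node_ids : List Int) (ordered_nodes : List Int), Dom_find_starter_node_in_group_py group_node_ids ordered_nodes → Spec_find_starter_node_in_group_py group_node_ids ordered_nodes (find_starter_node_in_group_py group_node_ids ordered_nodes)

-- ===== LEMMAS AND PROOFS =====

-- proof-side model of the first-occurrence index of x in a list
def pvFidx (x : Int) : List Int → Option Int
  | [] => none
  | a :: l => if a = x then some 0 else (pvFidx x l).map (· + 1)

theorem pvFidx_nonneg (x : Int) (l : List Int) (j : Int) (h : pvFidx x l = some j) : 0 ≤ j := by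
  induction l generalizing j with
  | nil => simp [pvFidx] at h
  | cons a l ih =>
    simp only [pvFidx] at h
    split at h
    · injection h with h'; omega
    · cases hf : pvFidx x l with
      | none => rw [hf] at h; simp at h
      | some k => rw [hf] at h; simp at h; have := ih k hf; omega

theorem pvFidx_zero (x g : Int) (rest : List Int) (h : pvFidx g (x :: rest) = some 0) : g = x := by
  by_cases hgx : x = g
  · exact hgx.symm
  · simp only [pvFidx, if_neg hgx] at h
    cases hf : pvFidx g rest with
    | none => rw [hf] at h; simp at h
    | some k =>
      rw [hf] at h; simp at h
      have := pvFidx_nonneg g rest k hf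
      omega

-- pvB_posAux computes the first-occurrence index shifted by the running counter, modulo keys
-- already present in the accumulator
theorem pvB_posAux_get (o : List Int) (d : PySem.Dict Int Int) (i : Int) (x : Int) :
    (pvB_posAux d i o).get? x =
      ((d.get? x).orElse (fun _ => (pvFidx x o).map (i + ·))) := by
  induction o generalizing d i with
  | nil => simp [pvB_posAux, pvFidx]
  | cons n rest ih =>
    simp only [pvB_posAux]
    rw [ih]
    by_cases hxn : n = x
    · subst hxn
      cases hd : d.get? n with
      | some v => simp [hd, Option.orElse]
      | none =>
        simp only [Option.isSome_none, Bool.false_eq_true, ite_false]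
        simp [PySem.Dict.get?_insert_self, pvFidx, Option.orElse]
    · have hget : (if (d.get? n).isSome then d else d.insert n i).get? x = d.get? x := by
        split
        · rfl
        · exact PySem.Dict.get?_insert_of_ne d i (Ne.symm hxn)
      rw [hget]
      cases hd : d.get? x with
      | some v => simp [Option.orElse]
      | none =>
        simp only [Option.orElse, pvFidx, if_neg hxn]
        cases hf : pvFidx x rest with
        | none => simp
        | some k => simp; omega

-- the built map is exactly the first-occurrence index
theorem pvB_pos_get (o : List Int) (x : Int) :
    (pvB_posAux PySem.Dict.empty 0 o).get? x = pvFidx x o := by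
  rw [pvB_posAux_get]
  simp only [PySem.Dict.get?_empty, Option.orElse]
  cases hf : pvFidx x o with
  | none => rfl
  | some k => simp

-- if no group element is present in pos, the pick loop leaves the accumulator alone
theorem pvB_pickAux_none (pos : PySem.Dict Int Int) (gs : List Int)
    (h : ∀ g ∈ gs, pos.get? g = none) (best best_i : Option Int) :
    pvB_pickAux pos best best_i gs = (best, best_i) := by
  induction gs with
  | nil => rfl
  | cons g gs ih =>
    simp only [pvB_pickAux]
    rw [h g (by simp)]
    exact ih (fun g hg => h g (by simp [hg]))

-- uniformly shifting all relevant indices by c does not change the pick loop's choice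
theorem pvB_pickAux_shift (pos1 pos2 : PySem.Dict Int Int) (c : Int) (gs : List Int)
    (h : ∀ g ∈ gs, pos1.get? g = (pos2.get? g).map (· + c)) (best best_i : Option Int) :
    pvB_pickAux pos1 best (best_i.map (· + c)) gs =
      ((pvB_pickAux pos2 best best_i gs).1, (pvB_pickAux pos2 best best_i gs).2.map (· + c)) := by
  induction gs generalizing best best_i with
  | nil => rfl
  | cons g gs ih =>
    have hmem : ∀ g' ∈ gs, pos1.get? g' = (pos2.get? g').map (· + c) :=
      fun g' hg' => h g' (by simp [hg'])
    simp only [pvB_pickAux]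
    rw [h g (by simp)]
    cases h2 : pos2.get? g with
    | none => exact ih hmem best best_i
    | some i =>
      simp only [Option.map_some]
      cases best_i with
      | none =>
        have := ih hmem (some g) (some i)
        simpa using this
      | some bi =>
        simp only [Option.map_some]
        by_cases hlt : i < bi
        · rw [if_pos (by omega), if_pos hlt]
          have := ih hmem (some g) (some i)
          simpa using this
        · rw [if_neg (by omega), if_neg hlt]
          have := ih hmem best (some bi)
          simpa using this

-- once the accumulator holds index 0 for x, with all indices nonnegative, the pick loop keeps it
theorem pvB_pickAux_keep_zero (pos : PySem.Dict Int Int) (x : Int) (gs : List Int)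
    (hnn : ∀ g j, pos.get? g = some j → 0 ≤ j) :
    pvB_pickAux pos (some x) (some 0) gs = (some x, some 0) := by
  induction gs with
  | nil => rfl
  | cons g gs ih =>
    simp only [pvB_pickAux]
    cases hp : pos.get? g with
    | none => exact ih
    | some i =>
      have h0 : 0 ≤ i := hnn g i hp
      have hni : ¬ i < 0 := by omega
      simpa [hni] using ih

-- if x ∈ gs has index 0 and 0 is attained only at x, x wins the pick loop
theorem pvB_pickAux_zero_wins (pos : PySem.Dict Int Int) (x : Int) (gs : List Int)
    (hx : x ∈ gs) (hpx : pos.get? x = some 0)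
    (hnn : ∀ g j, pos.get? g = some j → 0 ≤ j)
    (hz : ∀ g, pos.get? g = some 0 → g = x)
    (best best_i : Option Int)
    (hacc : (best_i = none) ∨ (∃ b j, best = some b ∧ best_i = some j ∧ 0 < j)) :
    pvB_pickAux pos best best_i gs = (some x, some 0) := by
  induction gs generalizing best best_i with
  | nil => simp at hx
  | cons g gs ih =>
    by_cases hgx : g = x
    · subst hgx
      simp only [pvB_pickAux, hpx]
      rcases hacc with h | ⟨b, j, hb, hj, hjpos⟩
      · subst h
        simpa using pvB_pickAux_keep_zero pos g gs hnn
      · subst hb; subst hj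
        simpa [hjpos] using pvB_pickAux_keep_zero pos g gs hnn
    · have hxs : x ∈ gs := by
        rcases List.mem_cons.mp hx with h | h
        · exact absurd h.symm hgx
        · exact h
      simp only [pvB_pickAux]
      cases hp : pos.get? g with
      | none => exact ih hxs best best_i hacc
      | some i =>
        have h0 : 0 ≤ i := hnn g i hp
        have hi : i ≠ 0 := fun h => hgx (hz g (h ▸ hp))
        have hipos : 0 < i := by omega
        rcases hacc with h | ⟨b, j, hb, hj, hjpos⟩
        · subst h
          simpa using ih hxs (some g) (some i) (Or.inr ⟨g, i, rfl, rfl, hipos⟩)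
        · subst hb; subst hj
          by_cases hlt : i < j
          · simpa [hlt] using ih hxs (some g) (some i) (Or.inr ⟨g, i, rfl, rfl, hipos⟩)
          · simpa [hlt] using ih hxs (some b) (some j) (Or.inr ⟨b, j, rfl, rfl, hjpos⟩)

theorem pvB_eq_pvA (group : List Int) (o : List Int) :
    (pvB_pickAux (pvB_posAux PySem.Dict.empty 0 o) none none group).1 = pvA_loop group o := by
  induction o with
  | nil =>
    rw [pvB_pickAux_none]
    · rfl
    · intro g _
      rw [pvB_pos_get]
      rfl
  | cons x rest ih =>
    by_cases hx : group.contains x = true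
    · -- x is in the group: A returns some x; B's pick is won by index 0
      have hAside : pvA_loop group (x :: rest) = some x := by
        simp only [pvA_loop]; rw [if_pos hx]
      rw [hAside]
      have hres := pvB_pickAux_zero_wins (pvB_posAux PySem.Dict.empty 0 (x :: rest)) x group
        (by simpa using hx)
        (by rw [pvB_pos_get]; simp [pvFidx])
        (fun g j hg => pvFidx_nonneg g (x :: rest) j (by rwa [pvB_pos_get] at hg))
        (fun g hg => pvFidx_zero x g rest (by rwa [pvB_pos_get] at hg))
        none none (Or.inl rfl)
      rw [hres]
    · -- x not in the group: both sides ignore x; B's indices all shift by 1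
      have hAside : pvA_loop group (x :: rest) = pvA_loop group rest := by
        simp only [pvA_loop]; rw [if_neg hx]
      rw [hAside, ← ih]
      have hshift : ∀ g ∈ group,
          (pvB_posAux PySem.Dict.empty 0 (x :: rest)).get? g =
            ((pvB_posAux PySem.Dict.empty 0 rest).get? g).map (· + 1) := by
        intro g hg
        have hgx : x ≠ g := by
          intro h; subst h
          exact hx (by simpa using hg)
        rw [pvB_pos_get, pvB_pos_get]
        simp only [pvFidx, if_neg hgx]
      have := pvB_pickAux_shift (pvB_posAux PySem.Dict.empty 0 (x :: rest))
        (pvB_posAux PySem.Dict.empty 0 rest) 1 group hshift none none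
      simpa using congrArg Prod.fst this

-- ===== VERDICT (by name: the statement is the Claim_ definition above) =====
theorem find_starter_node_in_group_py_spec : Claim_equal_find_starter_node_in_group_py := by
  intro group_node_ids ordered_nodes _
  unfold Spec_find_starter_node_in_group_py find_starter_node_in_group_py find_starter_node_in_group_py_alt
  exact (pvB_eq_pvA group_node_ids ordered_nodes).symm
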